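-- pv_equiv track=rewrite | github.com/judvalenciasa/Atutomata-ll0 | Automata.py | ponerPunto
-- ===== SOURCE A (Python) =====
-- import copy
--
-- def ponerPunto(lista2, arista):
--     l=copy.deepcopy(lista2)
--     for i in range (len(l)):
--         for i2 in range(2,len(l[i])):
--             if l[i][i2] != ".":
--                 if l[i][i2] == arista:
--                     l[i].insert(i2+1,".")
--     return l
-- ===== SOURCE B (Python) =====
-- def ponerPunto(lista2, arista):
--     res = []
--     for row in lista2:
--         out = row[:2]
--         for e in row[2:]:
--             out.append(e)
--             if e != "." and e == arista:
--                 out.append(".")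
--         res.append(out)
--     return res
-- ===== Notes on version B (the rewrite author's own statement) =====
-- stated objective: simpler
-- what changed: Each row is rebuilt in one left-to-right pass over a fresh list (append element, append '.' on a match) instead of A's deepcopy plus in-place list.insert inside an index loop whose range was fixed before the row grew.
-- intended difference: On rows where arista occurs again among the last elements after an earlier occurrence, A's range(2, len(l[i])) is exhausted early by the dots it inserted and silently leaves those later occurrences of arista undotted; B inserts '.' after every non-'.' occurrence of arista from index 2 on, which is the evident intent of the function. — e.g. on ponerPunto([["A", "B", "x", "x"]], "x"): A returns [["A", "B", "x", ".", "x"]], B returns [["A", "B", "x", ".", "x", "."]]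
import Mathlib
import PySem

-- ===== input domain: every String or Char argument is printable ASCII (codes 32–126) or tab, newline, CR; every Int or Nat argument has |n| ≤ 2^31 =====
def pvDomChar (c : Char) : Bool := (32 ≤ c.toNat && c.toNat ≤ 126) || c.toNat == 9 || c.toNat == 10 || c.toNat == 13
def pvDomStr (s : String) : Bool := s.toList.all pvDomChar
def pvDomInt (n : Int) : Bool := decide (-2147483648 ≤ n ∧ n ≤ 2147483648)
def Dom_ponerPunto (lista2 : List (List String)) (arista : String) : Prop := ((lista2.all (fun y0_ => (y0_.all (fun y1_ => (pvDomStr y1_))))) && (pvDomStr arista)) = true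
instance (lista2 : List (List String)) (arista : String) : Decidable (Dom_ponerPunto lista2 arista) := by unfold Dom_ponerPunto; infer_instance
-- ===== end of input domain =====

-- B rebuilds each row in one left-to-right pass (objective: simpler); on rows where A's
-- fixed-length range is exhausted by inserted dots, B dots the later matches A misses (see D_).

-- ===== PORT A =====
-- inner loop body of A: 'if l[i][i2] != ".": if l[i][i2] == arista: l[i].insert(i2+1, ".")'
def ponerPuntoStepA (arista : String) (r : List String) (i2 : Int) : List String :=
  match PySem.List.pyGet? r i2 with
  | some e => if e ≠ "." then (if e = arista then PySem.List.insert r (i2 + 1) "." else r) else r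
  | none => r

-- 'for i2 in range(2, len(l[i]))' over the (mutating) row; range bound taken from the row once
def ponerPuntoRowA (arista : String) (row : List String) : List String :=
  (PySem.List.pyRange 2 (row.length : Int) 1).foldl (ponerPuntoStepA arista) row

-- outer 'for i in range(len(l))' rewrites row i only, i.e. a map over the rows (deepcopy = pure)
def ponerPunto (lista2 : List (List String)) (arista : String) : List (List String) :=
  lista2.map (ponerPuntoRowA arista)

-- ===== PORT B =====
-- Source B's inner loop: 'for e in row[2:]: out.append(e); if e != "." and e == arista: out.append(".")'
def ponerPuntoDotB (arista : String) (t : List String) : List String :=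
  match t with
  | [] => []
  | e :: rs =>
    if e ≠ "." ∧ e = arista then e :: "." :: ponerPuntoDotB arista rs
    else e :: ponerPuntoDotB arista rs

-- 'out = row[:2]' then the loop over 'row[2:]'
def ponerPunto_alt (lista2 : List (List String)) (arista : String) : List (List String) :=
  lista2.map (fun row => row.take 2 ++ ponerPuntoDotB arista (row.drop 2))

-- ===== PRECONDITION & SPEC =====
-- On rows where arista occurs again among the last elements after an earlier occurrence, A's
-- range(2, len(l[i])) — measured before the row grew — is exhausted early by the inserted dots
-- and silently leaves those later occurrences of arista undotted; B dots every non-'.'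
-- occurrence of arista from index 2 on, the evident intent.
-- A row is affected iff some occurrence of arista at position j of row[2:] lies at or beyond the
-- scan boundary len(row[2:]) - (occurrences of arista before j).
def ponerPuntoRowBad (arista : String) (row : List String) : Bool :=
  (!(arista == ".")) &&
    ((List.range (row.drop 2).length).any (fun j =>
      ((row.drop 2)[j]? == some arista) &&
        decide ((row.drop 2).length ≤ j + ((row.drop 2).take j).count arista)))

def D_ponerPunto (lista2 : List (List String)) (arista : String) : Prop :=
  (lista2.any (ponerPuntoRowBad arista)) = true
instance (lista2 : List (List String)) (arista : String) : Decidable (D_ponerPunto lista2 arista) := by unfold D_ponerPunto; infer_instance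

def Spec_ponerPunto (lista2 : List (List String)) (arista : String) (out : List (List String)) : Prop := ¬ D_ponerPunto lista2 arista → out = ponerPunto_alt lista2 arista
instance (lista2 : List (List String)) (arista : String) (out : List (List String)) : Decidable (Spec_ponerPunto lista2 arista out) := by unfold Spec_ponerPunto; infer_instance

def pvDiffWitness_ponerPunto : List (List String) × String := ([["A", "B", "x", "x"]], "x")
def pvDiffWitnessOut_ponerPunto : (List (List String)) × (List (List String)) :=
  ([["A", "B", "x", ".", "x"]], [["A", "B", "x", ".", "x", "."]])

-- ===== CLAIM (what is proved, stated in full; the proofs are below) =====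
def Claim_unchanged_ponerPunto : Prop := ∀ (lista2 : List (List String)) (arista : String), Dom_ponerPunto lista2 arista → Spec_ponerPunto lista2 arista (ponerPunto lista2 arista)
def Claim_changed_ponerPunto : Prop := Dom_ponerPunto (pvDiffWitness_ponerPunto.1) (pvDiffWitness_ponerPunto.2) ∧ D_ponerPunto (pvDiffWitness_ponerPunto.1) (pvDiffWitness_ponerPunto.2) ∧ ponerPunto (pvDiffWitness_ponerPunto.1) (pvDiffWitness_ponerPunto.2) = pvDiffWitnessOut_ponerPunto.1 ∧ ponerPunto_alt (pvDiffWitness_ponerPunto.1) (pvDiffWitness_ponerPunto.2) = pvDiffWitnessOut_ponerPunto.2 ∧ pvDiffWitnessOut_ponerPunto.1 ≠ pvDiffWitnessOut_ponerPunto.2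
def Claim_exact_ponerPunto : Prop := ∀ (lista2 : List (List String)) (arista : String), Dom_ponerPunto lista2 arista → D_ponerPunto lista2 arista → ponerPunto lista2 arista ≠ ponerPunto_alt lista2 arista

-- ===== LEMMAS AND PROOFS =====

-- proof-side characterization of A's row loop: a left-to-right rebuild with an iteration budget
-- (the fixed original range length); NOT part of either port.
def ponerPuntoLoopB (arista : String) (rest : List String) (b : Int) : List String :=
  if b ≤ 0 then rest
  else
    match rest with
    | [] => []
    | e :: rs =>
      if e ≠ "." ∧ e = arista then e :: "." :: ponerPuntoLoopB arista rs (b - 2)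
      else e :: ponerPuntoLoopB arista rs (b - 1)

lemma loopB_dot (ar : String) (rs : List String) (b : Int) :
    ponerPuntoLoopB ar ("." :: rs) b = "." :: ponerPuntoLoopB ar rs (b - 1) := by
  rw [ponerPuntoLoopB.eq_def]
  by_cases hb : b ≤ 0
  · rw [ponerPuntoLoopB.eq_def]
    simp [hb, show b - 1 ≤ 0 by omega]
  · simp [hb]

lemma loopB_nil (ar : String) (b : Int) : ponerPuntoLoopB ar [] b = [] := by
  rw [ponerPuntoLoopB.eq_def]; split <;> simp

lemma loopB_stop (ar : String) (t : List String) (b : Int) (hb : b ≤ 0) :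
    ponerPuntoLoopB ar t b = t := by
  rw [ponerPuntoLoopB.eq_def]; simp [hb]

lemma loopB_cons (ar e : String) (rs : List String) (b : Int) (hb : ¬ b ≤ 0) :
    ponerPuntoLoopB ar (e :: rs) b =
      if e ≠ "." ∧ e = ar then e :: "." :: ponerPuntoLoopB ar rs (b - 2)
      else e :: ponerPuntoLoopB ar rs (b - 1) := by
  rw [ponerPuntoLoopB.eq_def]; simp [hb]

-- indices past the end of the row leave A's fold state unchanged
lemma foldA_oob (ar : String) (k : ℕ) : ∀ (r : List String) (j : ℕ), r.length ≤ j →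
    (PySem.List.pyRange (j : Int) ((j : Int) + (k : Int)) 1).foldl (ponerPuntoStepA ar) r = r := by
  induction k with
  | zero => intro r j _; simp [PySem.List.pyRange_one_eq_nil]
  | succ k ih =>
    intro r j hj
    rw [show ((j : Int) + ((k + 1 : ℕ) : Int)) = ((j + 1 : ℕ) : Int) + (k : Int) by push_cast; ring,
        PySem.List.pyRange_one_cons (by push_cast; omega)]
    rw [List.foldl_cons]
    have hget : PySem.List.pyGet? r (j : Int) = none := by
      rw [PySem.List.pyGet?_natCast]
      exact List.getElem?_eq_none hj
    rw [show ponerPuntoStepA ar r (j : Int) = r by rw [ponerPuntoStepA.eq_def, hget],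
        show ((j : Int) + 1) = ((j + 1 : ℕ) : Int) by push_cast; ring]
    exact ih r (j + 1) (by omega)

-- main invariant: k remaining iterations starting at index j = budget-k rebuild of the suffix
lemma foldA_eq_loopB (ar : String) (k : ℕ) : ∀ (r : List String) (j : ℕ),
    (PySem.List.pyRange (j : Int) ((j : Int) + (k : Int)) 1).foldl (ponerPuntoStepA ar) r
      = r.take j ++ ponerPuntoLoopB ar (r.drop j) (k : Int) := by
  induction k with
  | zero =>
    intro r j
    rw [show ponerPuntoLoopB ar (r.drop j) ((0 : ℕ) : Int) = r.drop j by
          rw [ponerPuntoLoopB.eq_def]; simp]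
    simp [PySem.List.pyRange_one_eq_nil]
  | succ k ih =>
    intro r j
    rw [show ((j : Int) + ((k + 1 : ℕ) : Int)) = ((j + 1 : ℕ) : Int) + (k : Int) by push_cast; ring,
        PySem.List.pyRange_one_cons (by push_cast; omega), List.foldl_cons]
    by_cases hj : r.length ≤ j
    · have hget : PySem.List.pyGet? r (j : Int) = none := by
        rw [PySem.List.pyGet?_natCast]; exact List.getElem?_eq_none hj
      rw [show ponerPuntoStepA ar r (j : Int) = r by rw [ponerPuntoStepA.eq_def, hget],
          show ((j : Int) + 1) = ((j + 1 : ℕ) : Int) by push_cast; ring]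
      have := foldA_oob ar k r (j + 1) (by omega)
      rw [this, List.drop_eq_nil_of_le hj, loopB_nil, List.append_nil,
          List.take_of_length_le hj]
    · rw [not_le] at hj
      have hget : PySem.List.pyGet? r (j : Int) = some r[j] :=
        PySem.List.pyGet?_ofNat r j hj
      have hdrop : r.drop j = r[j] :: r.drop (j + 1) := List.drop_eq_getElem_cons hj
      have htake : r.take (j + 1) = r.take j ++ [r[j]] := List.take_succ_eq_append_getElem hj
      have hbud : ¬ (((k + 1 : ℕ) : Int) ≤ 0) := by push_cast; omega
      by_cases hm : r[j] ≠ "." ∧ r[j] = ar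
      · have hstep : ponerPuntoStepA ar r (j : Int)
            = r.take (j + 1) ++ "." :: r.drop (j + 1) := by
          rw [ponerPuntoStepA.eq_def, hget]
          show (if r[j] ≠ "." then if r[j] = ar then PySem.List.insert r ((j : Int) + 1) "." else r else r) = _
          rw [if_pos hm.1, if_pos hm.2,
              show ((j : Int) + 1) = ((j + 1 : ℕ) : Int) by push_cast; ring,
              PySem.List.insert_natCast _ _ _ (by omega)]
        rw [hstep, show ((j : Int) + 1) = ((j + 1 : ℕ) : Int) by push_cast; ring,
            ih (r.take (j + 1) ++ "." :: r.drop (j + 1)) (j + 1)]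
        have hlen : (r.take (j + 1)).length = j + 1 := by simp; omega
        rw [List.take_append_of_le_length (by omega), List.take_of_length_le (by omega),
            List.drop_append_of_le_length (by omega), List.drop_eq_nil_of_le (by omega),
            List.nil_append, loopB_dot, hdrop]
        rw [show ponerPuntoLoopB ar (r[j] :: r.drop (j + 1)) ((k + 1 : ℕ) : Int)
              = r[j] :: "." :: ponerPuntoLoopB ar (r.drop (j + 1)) (((k + 1 : ℕ) : Int) - 2) by
            rw [ponerPuntoLoopB.eq_def, if_neg hbud]; exact if_pos hm]
        rw [show ((k : ℕ) : Int) - 1 = ((k + 1 : ℕ) : Int) - 2 by push_cast; ring]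
        simp only [htake, List.append_assoc, List.singleton_append]
      · have hstep : ponerPuntoStepA ar r (j : Int) = r := by
          rw [ponerPuntoStepA.eq_def, hget]
          by_cases h1 : r[j] = "."
          · simp [h1]
          · have h2 : r[j] ≠ ar := fun h => hm ⟨h1, h⟩
            simp [h1, h2]
        rw [hstep, show ((j : Int) + 1) = ((j + 1 : ℕ) : Int) by push_cast; ring, ih r (j + 1),
            hdrop]
        rw [show ponerPuntoLoopB ar (r[j] :: r.drop (j + 1)) ((k + 1 : ℕ) : Int)
              = r[j] :: ponerPuntoLoopB ar (r.drop (j + 1)) (((k + 1 : ℕ) : Int) - 1) by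
            rw [ponerPuntoLoopB.eq_def, if_neg hbud]; exact if_neg hm]
        rw [show ((k : ℕ) : Int) = ((k + 1 : ℕ) : Int) - 1 by push_cast; ring]
        simp only [htake, List.append_assoc, List.singleton_append]

lemma rowA_eq_loopB (ar : String) (row : List String) :
    ponerPuntoRowA ar row
      = row.take 2 ++ ponerPuntoLoopB ar (row.drop 2) ((row.length : Int) - 2) := by
  rw [ponerPuntoRowA]
  by_cases h : row.length ≤ 2
  · rw [PySem.List.pyRange_one_eq_nil (by omega), List.foldl_nil,
        show ponerPuntoLoopB ar (row.drop 2) ((row.length : Int) - 2) = row.drop 2 by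
          rw [List.drop_eq_nil_of_le h, loopB_nil]]
    rw [List.drop_eq_nil_of_le h, List.append_nil, List.take_of_length_le h]
  · rw [not_le] at h
    have hk : (row.length : Int) = ((2 : ℕ) : Int) + ((row.length - 2 : ℕ) : Int) := by
      push_cast; omega
    rw [show (2 : Int) = ((2 : ℕ) : Int) by norm_num, hk,
        foldA_eq_loopB ar (row.length - 2) row 2]
    congr 2
    push_cast; omega

-- when nothing in t matches, both the budget loop and B's rebuild copy t unchanged
lemma loopB_nomatch (ar : String) (t : List String) (h : ∀ e ∈ t, ¬(e ≠ "." ∧ e = ar)) :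
    ∀ b, ponerPuntoLoopB ar t b = t := by
  induction t with
  | nil => intro b; exact loopB_nil ar b
  | cons e rs ih =>
    intro b
    rw [ponerPuntoLoopB.eq_def]
    by_cases hb : b ≤ 0
    · simp [hb]
    · simp only [if_neg hb]
      rw [if_neg (h e (by simp)), ih (fun x hx => h x (by simp [hx]))]

lemma dotB_nomatch (ar : String) (t : List String) (h : ∀ e ∈ t, ¬(e ≠ "." ∧ e = ar)) :
    ponerPuntoDotB ar t = t := by
  induction t with
  | nil => rfl
  | cons e rs ih =>
    rw [ponerPuntoDotB]
    rw [if_neg (h e (by simp)), ih (fun x hx => h x (by simp [hx]))]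

lemma dotB_length (ar : String) (har : ar ≠ ".") (t : List String) :
    (ponerPuntoDotB ar t).length = t.length + t.count ar := by
  induction t with
  | nil => rfl
  | cons e rs ih =>
    rw [ponerPuntoDotB, List.count_cons]
    by_cases he : e = ar
    · rw [if_pos ⟨by rw [he]; exact har, he⟩]
      simp [ih, he]
      omega
    · rw [if_neg (fun hc => he hc.2)]
      simp [ih, he]
      omega

-- enough budget (every match strictly inside the scan boundary) ⇒ the budget loop = B's rebuild
lemma loopB_eq_dotB (ar : String) (har : ar ≠ ".") :
    ∀ (t : List String) (b : Int),
      (∀ j, (hj : j < t.length) → t[j] = ar →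
        (j : Int) + ((t.take j).count ar : Int) < b) →
      ponerPuntoLoopB ar t b = ponerPuntoDotB ar t := by
  intro t
  induction t with
  | nil => intro b _; rw [loopB_nil]; rfl
  | cons e rs ih =>
    intro b hcond
    by_cases hb : b ≤ 0
    · -- no match can satisfy j + count < b ≤ 0, so neither list contains ar
      have hno : ∀ x ∈ e :: rs, ¬(x ≠ "." ∧ x = ar) := by
        intro x hx hc
        obtain ⟨j, hj, hxj⟩ := List.mem_iff_getElem.mp hx
        have := hcond j hj (hxj ▸ hc.2)
        have h0 : (0 : Int) ≤ (j : Int) + (((e :: rs).take j).count ar : Int) := by positivity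
        omega
      rw [loopB_stop ar _ b hb, dotB_nomatch ar (e :: rs) hno]
    · rw [loopB_cons ar e rs b hb, ponerPuntoDotB]
      by_cases hm : e ≠ "." ∧ e = ar
      · rw [if_pos hm, if_pos hm, ih (b - 2) ?_]
        intro j hj hja
        have := hcond (j + 1) (by simpa using Nat.succ_lt_succ hj) (by simpa using hja)
        have hcnt : ((e :: rs).take (j + 1)).count ar = (rs.take j).count ar + 1 := by
          simp [List.take_succ_cons, hm.2]
        rw [hcnt] at this
        push_cast at this ⊢
        omega
      · rw [if_neg hm, if_neg hm, ih (b - 1) ?_]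
        intro j hj hja
        have := hcond (j + 1) (by simpa using Nat.succ_lt_succ hj) (by simpa using hja)
        have hea : e ≠ ar := fun h => hm ⟨h ▸ har, h⟩
        have hcnt : ((e :: rs).take (j + 1)).count ar = (rs.take j).count ar := by
          simp [List.take_succ_cons, hea]
        rw [hcnt] at this
        push_cast at this ⊢
        omega

-- a match at or beyond the scan boundary ⇒ the budget loop is strictly shorter than B's rebuild
lemma loopB_lt_dotB (ar : String) (har : ar ≠ ".") :
    ∀ (t : List String) (b : Int),
      (∃ j, ∃ (hj : j < t.length), t[j] = ar ∧
        b ≤ (j : Int) + ((t.take j).count ar : Int)) →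
      (ponerPuntoLoopB ar t b).length < (ponerPuntoDotB ar t).length := by
  intro t
  induction t with
  | nil => rintro b ⟨j, hj, _⟩; exact absurd hj (by simp)
  | cons e rs ih =>
    rintro b ⟨j, hj, hja, hge⟩
    by_cases hb : b ≤ 0
    · -- loop copies; rebuild adds at least the dot for the match at j
      rw [loopB_stop ar _ b hb, dotB_length ar har]
      have : 1 ≤ (e :: rs).count ar := List.one_le_count_iff.mpr (hja ▸ List.getElem_mem hj)
      omega
    · rw [loopB_cons ar e rs b hb, ponerPuntoDotB]
      by_cases hm : e ≠ "." ∧ e = ar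
      · rw [if_pos hm, if_pos hm]
        have hj0 : j ≠ 0 := by
          intro h0
          subst h0
          simp at hge
          omega
        obtain ⟨j', rfl⟩ := Nat.exists_eq_succ_of_ne_zero hj0
        have hlt := ih (b - 2) ⟨j', by simpa using Nat.lt_of_succ_lt_succ hj, by simpa using hja, ?_⟩
        · simpa using Nat.succ_lt_succ (Nat.succ_lt_succ hlt)
        · have hcnt : ((e :: rs).take (j' + 1)).count ar = (rs.take j').count ar + 1 := by
            simp [List.take_succ_cons, hm.2]
          rw [hcnt] at hge
          push_cast at hge ⊢
          omega
      · rw [if_neg hm, if_neg hm]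
        have hea : e ≠ ar := fun h => hm ⟨h ▸ har, h⟩
        have hj0 : j ≠ 0 := by
          intro h0
          subst h0
          exact hea hja
        obtain ⟨j', rfl⟩ := Nat.exists_eq_succ_of_ne_zero hj0
        have hlt := ih (b - 1) ⟨j', by simpa using Nat.lt_of_succ_lt_succ hj, by simpa using hja, ?_⟩
        · simpa using Nat.succ_lt_succ hlt
        · have hcnt : ((e :: rs).take (j' + 1)).count ar = (rs.take j').count ar := by
            simp [List.take_succ_cons, hea]
          rw [hcnt] at hge
          push_cast at hge ⊢
          omega

-- a good row: A's loop equals B's rebuild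
lemma rowA_eq_rowB_of_good (ar : String) (row : List String)
    (h : ponerPuntoRowBad ar row = false) :
    ponerPuntoRowA ar row = row.take 2 ++ ponerPuntoDotB ar (row.drop 2) := by
  rw [rowA_eq_loopB]
  congr 1
  by_cases h2 : row.length ≤ 2
  · rw [List.drop_eq_nil_of_le h2, loopB_nil]; rfl
  · rw [not_le] at h2
    by_cases har : ar = "."
    · have hno : ∀ e ∈ row.drop 2, ¬(e ≠ "." ∧ e = ar) := by
        intro e _ hc; exact hc.1 (har ▸ hc.2)
      rw [loopB_nomatch ar _ hno, dotB_nomatch ar _ hno]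
    · have hb : (row.length : Int) - 2 = ((row.drop 2).length : Int) := by
        simp; omega
      rw [hb]
      apply loopB_eq_dotB ar har
      intro j hj hja
      unfold ponerPuntoRowBad at h
      rw [Bool.and_eq_false_iff] at h
      have hany : ((List.range (row.drop 2).length).any (fun j =>
          ((row.drop 2)[j]? == some ar) &&
            decide ((row.drop 2).length ≤ j + ((row.drop 2).take j).count ar))) = false := by
        rcases h with h | h
        · simp [har] at h
        · exact h
      rw [List.any_eq_false] at hany
      have h' := hany j (List.mem_range.mpr hj)
      simp only [Bool.and_eq_true, beq_iff_eq, decide_eq_true_eq, not_and, not_le] at h'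
      have hlt := h' (by rw [List.getElem?_eq_getElem hj, hja])
      omega

-- a bad row: A's loop is strictly shorter than B's rebuild, hence different
lemma rowA_ne_rowB_of_bad (ar : String) (row : List String)
    (h : ponerPuntoRowBad ar row = true) :
    ponerPuntoRowA ar row ≠ row.take 2 ++ ponerPuntoDotB ar (row.drop 2) := by
  simp only [ponerPuntoRowBad, Bool.and_eq_true, List.any_eq_true] at h
  obtain ⟨har', j, hjmem, hcond⟩ := h
  have har : ar ≠ "." := by simpa using har'
  have hj : j < (row.drop 2).length := List.mem_range.mp hjmem
  simp only [beq_iff_eq, decide_eq_true_eq] at hcond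
  obtain ⟨hget, hle⟩ := hcond
  have hja : (row.drop 2)[j] = ar := by
    rw [List.getElem?_eq_getElem hj] at hget
    exact Option.some.inj hget
  have h2 : 2 < row.length := by
    have h' := hj
    rw [List.length_drop] at h'
    omega
  intro heq
  rw [rowA_eq_loopB] at heq
  have hb : (row.length : Int) - 2 = ((row.drop 2).length : Int) := by simp; omega
  rw [hb] at heq
  have hlt := loopB_lt_dotB ar har (row.drop 2) ((row.drop 2).length : Int)
    ⟨j, hj, hja, by omega⟩
  have := congrArg List.length heq
  simp only [List.length_append] at this
  omega

-- ===== VERDICT (by name: the statement is the Claim_ definition above) =====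
theorem ponerPunto_spec : Claim_unchanged_ponerPunto := by
  intro lista2 arista _ hD
  unfold ponerPunto ponerPunto_alt
  apply List.map_congr_left
  intro row hrow
  apply rowA_eq_rowB_of_good
  unfold D_ponerPunto at hD
  have hfa : lista2.any (ponerPuntoRowBad arista) = false := Bool.eq_false_iff.mpr hD
  rw [List.any_eq_false] at hfa
  exact Bool.eq_false_iff.mpr (hfa row hrow)

theorem ponerPunto_changed : Claim_changed_ponerPunto := by
  unfold Claim_changed_ponerPunto; decide

theorem ponerPunto_tight : Claim_exact_ponerPunto := by
  intro lista2 arista _ hD heq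
  unfold D_ponerPunto at hD
  rw [List.any_eq_true] at hD
  obtain ⟨row, hrow, hbad⟩ := hD
  obtain ⟨i, hi, hrowi⟩ := List.mem_iff_getElem.mp hrow
  have h1 : (ponerPunto lista2 arista)[i]'(by simpa [ponerPunto] using hi)
      = ponerPuntoRowA arista row := by
    simp [ponerPunto, hrowi]
  have h2 : (ponerPunto_alt lista2 arista)[i]'(by simpa [ponerPunto_alt] using hi)
      = row.take 2 ++ ponerPuntoDotB arista (row.drop 2) := by
    simp [ponerPunto_alt, hrowi]
  have := rowA_ne_rowB_of_bad arista row hbad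
  apply this
  rw [← h1, ← h2]
  congr 1
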